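-- pv_equiv track=rewrite | github.com/bsweat/python-projects | dnaSequencing.py | findBestCandidate
-- ===== SOURCE A (Python) =====
-- def strandsAreEqualLengths(strand1,strand2):
--     len1 = len(strand1)
--     len2 = len(strand2)
--     equal = bool(len1 == len2)
--     return equal
--
-- def findLargestOverlap(target,candidate):
--     equality = strandsAreEqualLengths(target,candidate)
--     if equality == True and target != '':
--         length = len(target)
--         lengthlist = range(0,length+1)
--         longest = 0
--         for x in lengthlist:
--             overlaps = 0
--             overlapBool = False
--             if target[-x:] == candidate[0:x]:
--                 overlapBool = True
--             else:
--                 overlapBool = False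
--             if overlapBool == True:
--                 if x > longest:
--                     longest = x
--                 else:
--                     pass
--             else:
--                 pass
--         return longest
--         #longest type  = int
--
--     else:
--         return -1
--
-- def findBestCandidate(target,candidates):
--     longest = 0
--     candidate = ''
--     for x in candidates:
--         test = findLargestOverlap(target,x)
--         if test > longest:
--             longest = test
--             candidate = x
--     bestCandidate = (candidate,longest)
--     return bestCandidate
-- ===== SOURCE B (Python) =====
-- def _kmpStep(rt, f, j, ch):
--     # advance the KMP automaton for pattern rt (failure table f) from state j on ch
--     while j > 0 and rt[j] != ch:
--         j = f[j]
--     if rt[j] == ch: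
--         j += 1
--     return j
--
-- def findBestCandidate(target, candidates):
--     # KMP: score each equal-length candidate with a single automaton scan instead of
--     # comparing target[-x:] with candidate[:x] for every length x.
--     L = len(target)
--     rt = target[::-1]
--     # failure table for the pattern rt: f[i] = length of the longest proper border of rt[:i]
--     f = [0, 0]
--     k = 0
--     for j in range(1, L):
--         k = _kmpStep(rt, f, k, rt[j])
--         f.append(k)
--     best, best_len = '', 0
--     for c in candidates:
--         if len(c) != L:
--             continue
--         j = 0
--         for ch in reversed(c):
--             j = _kmpStep(rt, f, j, ch)
--         if j > best_len:
--             best, best_len = c, j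
--     return (best, best_len)
-- ===== Notes on version B (the rewrite author's own statement) =====
-- stated objective: alternative
-- what changed: B replaces A's per-candidate loop over all overlap lengths with slice comparisons by a KMP string-matching automaton: it builds a failure table for the reversed target once and scores each equal-length candidate with a single left-to-right scan of its reversed characters, the final automaton state being the overlap length.
import Mathlib
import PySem

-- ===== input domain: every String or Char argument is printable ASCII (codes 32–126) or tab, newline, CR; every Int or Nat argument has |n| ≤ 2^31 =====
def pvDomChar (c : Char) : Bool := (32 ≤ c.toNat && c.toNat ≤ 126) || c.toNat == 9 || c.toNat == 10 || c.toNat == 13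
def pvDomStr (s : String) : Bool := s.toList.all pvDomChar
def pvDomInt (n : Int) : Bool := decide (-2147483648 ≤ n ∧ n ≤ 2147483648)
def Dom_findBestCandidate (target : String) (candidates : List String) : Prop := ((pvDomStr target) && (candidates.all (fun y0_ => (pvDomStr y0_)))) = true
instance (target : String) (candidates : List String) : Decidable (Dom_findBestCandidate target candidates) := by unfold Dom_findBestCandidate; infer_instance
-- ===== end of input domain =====

-- B scores each equal-length candidate with a single scan through a KMP automaton for the
-- reversed target (failure table built once), instead of A's per-candidate comparison of
-- target[-x:] against candidate[:x] for every length x (objective: alternative algorithm).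

-- ===== PORT A =====
def strandsAreEqualLengths (strand1 strand2 : String) : Bool :=
  let len1 := PySem.Str.len strand1
  let len2 := PySem.Str.len strand2
  let equal := decide (len1 = len2)
  equal

def findLargestOverlap (target candidate : String) : Int :=
  let equality := strandsAreEqualLengths target candidate
  if equality = true ∧ target ≠ "" then
    let length := PySem.Str.len target
    let lengthlist := PySem.List.pyRange 0 (length + 1) 1
    let longest : Int := lengthlist.foldl (fun longest x =>
      let overlapBool :=
        if PySem.Str.slice target (some (-x)) none == PySem.Str.slice candidate (some 0) (some x)
        then true else false
      if overlapBool = true then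
        if x > longest then x else longest
      else longest) 0
    longest
  else -1

def findBestCandidate (target : String) (candidates : List String) : String × Int :=
  let st := candidates.foldl (fun (st : Int × String) x =>
    let test := findLargestOverlap target x
    if test > st.1 then (test, x) else st) (0, "")
  (st.2, st.1)

-- ===== PORT B =====
-- B works on strings char by char; rt[j] / rt[k] (always in range when read, shown in the
-- proofs) is getD, reversed(c) is List.reverse, and the dynamic list f is built by append.

-- the `while j > 0 and rt[j] != ch: j = f[j]` loop of _kmpStep; j strictly decreases
-- (f[j] < j), so fuel = the starting j is enough for the recursion to run to completion.
def pvKmpWhile (rt : List Char) (f : List Nat) (ch : Char) : Nat → Nat → Nat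
  | 0, j => j
  | fuel+1, j => if 0 < j ∧ rt.getD j ' ' ≠ ch then pvKmpWhile rt f ch fuel (f.getD j 0) else j

-- _kmpStep of Source B: the while, then `if rt[j] == ch: j += 1`
def pvKmpStep (rt : List Char) (f : List Nat) (j : Nat) (ch : Char) : Nat :=
  let j2 := pvKmpWhile rt f ch j j
  if rt.getD j2 ' ' = ch then j2 + 1 else j2

def findBestCandidate_alt (target : String) (candidates : List String) : String × Int :=
  let T := target.toList
  let L := T.length
  let rt := T.reverse
  let fk : List Nat × Nat := (PySem.List.pyRange 1 (L : Int) 1).foldl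
      (fun (fk : List Nat × Nat) j =>
        let k := pvKmpStep rt fk.1 fk.2 (rt.getD j.toNat ' ')
        (fk.1 ++ [k], k)) ([0, 0], 0)
  let f := fk.1
  candidates.foldl (fun (st : String × Int) c =>
    if c.toList.length = L then
      let j : Nat := c.toList.reverse.foldl (pvKmpStep rt f) 0
      if (j : Int) > st.2 then (c, (j : Int)) else st
    else st) ("", 0)

-- ===== PRECONDITION & SPEC =====
def Spec_findBestCandidate (target : String) (candidates : List String) (out : String × Int) : Prop := out = findBestCandidate_alt target candidates
instance (target : String) (candidates : List String) (out : String × Int) : Decidable (Spec_findBestCandidate target candidates out) := by unfold Spec_findBestCandidate; infer_instance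

-- ===== CLAIM (what is proved, stated in full; the proofs are below) =====
def Claim_equal_findBestCandidate : Prop := ∀ (target : String) (candidates : List String), Dom_findBestCandidate target candidates → Spec_findBestCandidate target candidates (findBestCandidate target candidates)

-- ===== LEMMAS AND PROOFS =====

-- `G p u` : the length of the longest prefix of p that is a suffix of u (searched up to |p|).
def pvG (p u : List Char) : Nat := Nat.findGreatest (fun x => p.take x <:+ u) p.length

-- correctness statement for one failure-table entry: f[i] is the longest proper border of p.take i
def pvTabOK (p : List Char) (f : List Nat) (i : Nat) : Prop :=
  f.getD i 0 < i ∧ p.take (f.getD i 0) <:+ p.take i ∧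
  ∀ b, f.getD i 0 < b → b < i → ¬ p.take b <:+ p.take i

-- the first m iterations of Source B's table-building loop (state = (f, k))
def pvBuildF (p : List Char) (m : Nat) : List Nat × Nat :=
  (PySem.List.pyRange 1 (1 + (m : Int)) 1).foldl
    (fun (fk : List Nat × Nat) j =>
      let k := pvKmpStep p fk.1 fk.2 (p.getD j.toNat ' ')
      (fk.1 ++ [k], k)) ([0, 0], 0)

-- suffix-of-suffix: among suffixes of u, the shorter is a suffix of the longer
theorem pv_suffix_of_suffix {u v w : List Char} (h1 : u <:+ w) (h2 : v <:+ w)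
    (h : u.length ≤ v.length) : u <:+ v := by
  rw [← List.reverse_prefix] at h1 h2 ⊢
  exact List.prefix_of_prefix_length_le h1 h2 (by simpa using h)

-- take (x+1) splits off its last char
theorem pv_take_succ (p : List Char) (x : Nat) (h : x < p.length) :
    p.take (x+1) = p.take x ++ [p.getD x ' '] := by
  rw [List.take_add_one, List.getElem?_eq_getElem h]
  simp [List.getD, List.getElem?_eq_getElem h]

-- appending one char on both sides of a suffix
theorem pv_concat_suffix_concat (l u : List Char) (b a : Char) :
    l ++ [b] <:+ u ++ [a] ↔ l <:+ u ∧ b = a := by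
  rw [← List.reverse_prefix]
  simp only [List.reverse_append, List.reverse_cons, List.reverse_nil, List.nil_append,
    List.singleton_append, List.cons_prefix_cons, List.reverse_prefix]
  tauto

-- a take-prefix that is a suffix: its length is pinned by the drop form (x ≤ |p|)
theorem pv_take_suffix_iff (p u : List Char) (x : Nat) (hx : x ≤ p.length) :
    p.take x <:+ u ↔ p.take x = u.drop (u.length - x) := by
  rw [List.suffix_iff_eq_drop, List.length_take, Nat.min_eq_left hx]

-- a prefix of p of length x ≤ |p| that is a suffix of u has x ≤ |u|
theorem pv_take_suffix_le (p u : List Char) (x : Nat) (hx : x ≤ p.length)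
    (h : p.take x <:+ u) : x ≤ u.length := by
  have := h.length_le
  simpa [Nat.min_eq_left hx] using this

-- nothing non-trivial is a suffix of the empty text
theorem pv_pvG_nil (p : List Char) : pvG p [] = 0 := by
  unfold pvG
  rw [Nat.findGreatest_eq_zero_iff]
  intro x hx hxl hsuf
  have := pv_take_suffix_le p [] x hxl hsuf
  simp at this
  omega

-- a table entry is stable under appending further entries
theorem pv_tabOK_append (p : List Char) (f : List Nat) (k i : Nat) (hi : i < f.length)
    (h : pvTabOK p f i) : pvTabOK p (f ++ [k]) i := by
  have hg : (f ++ [k]).getD i 0 = f.getD i 0 := by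
    rw [List.getD, List.getD, List.getElem?_append_left hi]
  rw [pvTabOK, hg]
  exact h

-- while-loop spec: given a table correct at the indices it can consult, descending the
-- border chain from v finds the largest b ≤ v with p.take b <:+ u and p[b] = ch (or 0)
theorem pv_kmpWhile_spec (p u : List Char) (f : List Nat) (ch : Char) :
    ∀ fuel v, v ≤ fuel → v < p.length → p.take v <:+ u →
      (∀ i, 1 ≤ i → i ≤ v → pvTabOK p f i) →
      let r := pvKmpWhile p f ch fuel v
      r ≤ v ∧ p.take r <:+ u ∧ (r = 0 ∨ p.getD r ' ' = ch) ∧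
      ∀ b, r < b → b ≤ v → p.take b <:+ u → p.getD b ' ' ≠ ch := by
  intro fuel
  induction fuel with
  | zero =>
    intro v hv hvp hsuf htab
    have hv0 : v = 0 := by omega
    subst hv0
    refine ⟨le_refl _, hsuf, Or.inl rfl, ?_⟩
    intro b h1 h2; omega
  | succ n ih =>
    intro v hv hvp hsuf htab
    have hunf : pvKmpWhile p f ch (n+1) v
        = if 0 < v ∧ p.getD v ' ' ≠ ch then pvKmpWhile p f ch n (f.getD v 0)
          else v := rfl
    simp only [hunf]
    by_cases hC : 0 < v ∧ p.getD v ' ' ≠ ch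
    · rw [if_pos hC]
      obtain ⟨hf1, hf2, hf3⟩ := htab v hC.1 le_rfl
      have hsufr : p.take (f.getD v 0) <:+ u := hf2.trans hsuf
      obtain ⟨ihr1, ihr2, ihr3, ihr4⟩ := ih (f.getD v 0) (by omega) (by omega) hsufr
        (fun i hi1 hi2 => htab i hi1 (by omega))
      refine ⟨by omega, ihr2, ihr3, ?_⟩
      intro b hb1 hb2 hbsuf
      rcases Nat.lt_or_ge (f.getD v 0) b with hb | hb
      · rcases Nat.lt_or_ge b v with hbv | hbv
        · -- f[v] < b < v : p.take b would be a border of p.take v, contradicting maximality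
          exfalso
          have hbj : p.take b <:+ p.take v :=
            pv_suffix_of_suffix hbsuf hsuf
              (by simp [Nat.min_eq_left (by omega : b ≤ p.length),
                        Nat.min_eq_left (le_of_lt hvp)]; omega)
          exact hf3 b hb hbv hbj
        · have hbe : b = v := by omega
          subst hbe
          exact hC.2
      · exact ihr4 b hb1 hb hbsuf
    · rw [if_neg hC]
      refine ⟨le_refl _, hsuf, ?_, ?_⟩
      · rcases Nat.eq_zero_or_pos v with h | h
        · exact Or.inl h
        · right
          by_contra hne
          exact hC ⟨h, hne⟩
      · intro b h1 h2; omega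

-- one-step characterisation: p.take x <:+ u ++ [ch] (1 ≤ x ≤ |p|)
theorem pv_step_char (p u : List Char) (ch : Char) (x : Nat) (h1 : 1 ≤ x) (hx : x ≤ p.length) :
    (p.take x <:+ u ++ [ch]) ↔ (p.take (x-1) <:+ u ∧ p.getD (x-1) ' ' = ch) := by
  obtain ⟨b, rfl⟩ : ∃ b, x = b + 1 := ⟨x-1, by omega⟩
  have hb : b < p.length := by omega
  rw [pv_take_succ p b hb]
  simp only [Nat.add_sub_cancel]
  exact pv_concat_suffix_concat _ _ _ _

-- the automaton step maintains the invariant "state = pvG p (consumed text)"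
theorem pv_kmpStep_spec (p u : List Char) (f : List Nat) (ch : Char)
    (hu : u.length < p.length)
    (htab : ∀ i, 1 ≤ i → i ≤ pvG p u → pvTabOK p f i) :
    pvKmpStep p f (pvG p u) ch = pvG p (u ++ [ch]) := by
  have hP0 : p.take 0 <:+ u := by simp
  have hj0suf : p.take (pvG p u) <:+ u := by
    unfold pvG; exact Nat.findGreatest_spec (P := fun x => p.take x <:+ u) (Nat.zero_le _) hP0
  have hj0le : pvG p u ≤ p.length := by unfold pvG; exact Nat.findGreatest_le _
  have hj0max : ∀ b, pvG p u < b → b ≤ p.length → ¬ p.take b <:+ u := by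
    unfold pvG; exact fun b hb1 hb2 => Nat.findGreatest_is_greatest hb1 hb2
  have hj0lt : pvG p u < p.length :=
    lt_of_le_of_lt (pv_take_suffix_le p u (pvG p u) hj0le hj0suf) hu
  obtain ⟨hr1, hr2, hr3, hr4⟩ :=
    pv_kmpWhile_spec p u f ch (pvG p u) (pvG p u) le_rfl hj0lt hj0suf htab
  simp only [pvKmpStep]
  set j2 := pvKmpWhile p f ch (pvG p u) (pvG p u) with hj2def
  have hj2lt : j2 < p.length := by omega
  have hmax' : ∀ b, j2 < b → b ≤ p.length → p.take b <:+ u → p.getD b ' ' ≠ ch := by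
    intro b hb1 hb2 hbsuf
    rcases Nat.lt_or_ge (pvG p u) b with hb | hb
    · exact absurd hbsuf (hj0max b hb hb2)
    · exact hr4 b hb1 hb hbsuf
  by_cases hch : p.getD j2 ' ' = ch
  · rw [if_pos hch]
    apply Nat.le_antisymm
    · unfold pvG
      exact Nat.le_findGreatest (by omega)
        ((pv_step_char p u ch (j2+1) (by omega) (by omega)).mpr
          (by simpa using ⟨hr2, hch⟩))
    · by_contra hgt
      have hgt' : j2 + 1 < pvG p (u ++ [ch]) := by omega
      have hMle : pvG p (u ++ [ch]) ≤ p.length := by unfold pvG; exact Nat.findGreatest_le _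
      have hMsuf : p.take (pvG p (u ++ [ch])) <:+ u ++ [ch] := by
        unfold pvG
        exact Nat.findGreatest_spec (P := fun x => p.take x <:+ u ++ [ch])
          (Nat.zero_le _) (by simp)
      obtain ⟨hbsuf, hbch⟩ :=
        (pv_step_char p u ch _ (by omega) hMle).mp hMsuf
      exact hmax' (pvG p (u ++ [ch]) - 1) (by omega) (by omega) hbsuf hbch
  · rw [if_neg hch]
    have hj2z : j2 = 0 := by
      rcases hr3 with h | h
      · exact h
      · exact absurd h hch
    symm
    unfold pvG
    rw [hj2z, Nat.findGreatest_eq_zero_iff]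
    intro x hx hxl hxsuf
    obtain ⟨hbsuf, hbch⟩ := (pv_step_char p u ch x (by omega) hxl).mp hxsuf
    rcases Nat.eq_zero_or_pos (x - 1) with h0 | h0
    · rw [h0] at hbch
      rw [hj2z] at hch
      exact hch hbch
    · exact hmax' (x-1) (by omega) (by omega) hbsuf hbch

-- full scan: the final automaton state is the longest prefix of p that is a suffix of w
theorem pv_scan_spec (p : List Char) (f : List Nat) (w : List Char)
    (hw : w.length ≤ p.length)
    (htab : ∀ i, 1 ≤ i → i < p.length → pvTabOK p f i) :
    w.foldl (pvKmpStep p f) 0 = pvG p w := by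
  induction w using List.reverseRecOn with
  | nil =>
    simp only [List.foldl_nil]
    exact (pv_pvG_nil p).symm
  | append_singleton u a ih =>
    have hu : u.length < p.length := by simp at hw; omega
    rw [List.foldl_append, List.foldl_cons, List.foldl_nil, ih (by omega)]
    exact pv_kmpStep_spec p u f a hu
      (fun i h1 h2 => htab i h1 (by
        have : pvG p u ≤ p.length := by unfold pvG; exact Nat.findGreatest_le _
        have hsuf : p.take (pvG p u) <:+ u := by
          unfold pvG
          exact Nat.findGreatest_spec (P := fun x => p.take x <:+ u) (Nat.zero_le _) (by simp)
        have := pv_take_suffix_le p u (pvG p u) this hsuf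
        omega))

-- proper borders of p.take (i+1) are exactly the take-suffixes of its tail
theorem pv_proper_border (p : List Char) (i b : Nat) (hi : i < p.length) (hb : b ≤ i) :
    p.take b <:+ p.take (i+1) ↔ p.take b <:+ (p.drop 1).take i := by
  have hlen1 : (p.take (i+1)).length = i+1 := by simp; omega
  have hdt : (p.take (i+1)).drop 1 = (p.drop 1).take i := by
    rw [List.drop_take]
    norm_num
  constructor
  · intro h
    rw [pv_take_suffix_iff p _ b (by omega)] at h
    rw [hlen1] at h
    rw [pv_take_suffix_iff p _ b (by omega), ← hdt, List.length_drop, hlen1, List.drop_drop]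
    convert h using 2
    omega
  · intro h
    rw [← hdt] at h
    exact h.trans (List.drop_suffix 1 _)

-- invariant of Source B's table-building loop: after m iterations the running state k is the
-- automaton state on the tail of p, and every table entry built so far is correct
theorem pv_build_inv (p : List Char) (hp : p ≠ []) :
    ∀ m, m ≤ p.length - 1 →
      (pvBuildF p m).1.length = m + 2 ∧
      (pvBuildF p m).2 = pvG p ((p.drop 1).take m) ∧
      (∀ i, 1 ≤ i → i ≤ m + 1 → pvTabOK p (pvBuildF p m).1 i) := by
  intro m
  induction m with
  | zero =>
    intro _
    have he : pvBuildF p 0 = ([0, 0], 0) := by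
      unfold pvBuildF
      rw [PySem.List.pyRange_one_eq_nil (by omega)]
      rfl
    rw [he]
    refine ⟨rfl, by rw [List.take_zero, pv_pvG_nil], ?_⟩
    intro i h1 h2
    have : i = 1 := by omega
    subst this
    refine ⟨by decide, by simp, ?_⟩
    intro b hb1 hb2; omega
  | succ m ih =>
    intro hm
    obtain ⟨ihlen, ihk, ihtab⟩ := ih (by omega)
    have hL1 : 1 ≤ p.length := by
      cases p with
      | nil => exact absurd rfl hp
      | cons a l => simp
    have hwlen : (p.drop 1).length = p.length - 1 := by simp
    have hmw : m < (p.drop 1).length := by omega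
    have hsplit : PySem.List.pyRange 1 (1 + ((m+1 : Nat) : Int)) 1
        = PySem.List.pyRange 1 (1 + (m : Int)) 1 ++ [1 + (m : Int)] := by
      have hc : (1 + ((m+1 : Nat) : Int)) = (1 + (m : Int)) + 1 := by push_cast; ring
      rw [hc, PySem.List.pyRange_one_succ_right (by omega)]
    have hstep : pvBuildF p (m+1)
        = ((pvBuildF p m).1 ++ [pvKmpStep p (pvBuildF p m).1 (pvBuildF p m).2
              (p.getD (1 + (m : Int)).toNat ' ')],
           pvKmpStep p (pvBuildF p m).1 (pvBuildF p m).2 (p.getD (1 + (m : Int)).toNat ' ')) := by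
      unfold pvBuildF
      rw [hsplit, List.foldl_append, List.foldl_cons, List.foldl_nil]
    have hchar : p.getD (1 + (m : Int)).toNat ' ' = (p.drop 1).getD m ' ' := by
      have ht : (1 + (m : Int)).toNat = 1 + m := by omega
      rw [ht, List.getD, List.getD, List.getElem?_drop]
    have htake : (p.drop 1).take (m+1) = (p.drop 1).take m ++ [(p.drop 1).getD m ' '] :=
      pv_take_succ _ m hmw
    have hknew : pvKmpStep p (pvBuildF p m).1 (pvBuildF p m).2 (p.getD (1 + (m : Int)).toNat ' ')
        = pvG p ((p.drop 1).take (m+1)) := by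
      rw [hchar, ihk, htake]
      apply pv_kmpStep_spec
      · rw [List.length_take, Nat.min_eq_left (by omega)]
        omega
      · intro i h1 h2
        apply ihtab i h1
        have hle : pvG p ((p.drop 1).take m) ≤ p.length := by
          unfold pvG; exact Nat.findGreatest_le _
        have hsuf : p.take (pvG p ((p.drop 1).take m)) <:+ (p.drop 1).take m := by
          unfold pvG
          exact Nat.findGreatest_spec (P := fun x => p.take x <:+ (p.drop 1).take m)
            (Nat.zero_le _) (by simp)
        have := pv_take_suffix_le p _ _ hle hsuf
        rw [List.length_take, Nat.min_eq_left (by omega)] at this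
        omega
    refine ⟨?_, ?_, ?_⟩
    · rw [hstep]; simp [ihlen]
    · rw [hstep, hknew]
    · intro i h1 h2
      rcases Nat.lt_or_ge i (m+2) with hi | hi
      · rw [hstep]
        exact pv_tabOK_append p _ _ i (by omega) (ihtab i h1 (by omega))
      · -- i = m+2 : the freshly appended entry
        have hie : i = m + 2 := by omega
        subst hie
        have hgnew : (pvBuildF p (m+1)).1.getD (m+2) 0
            = pvG p ((p.drop 1).take (m+1)) := by
          rw [hstep, hknew, List.getD, List.getElem?_append_right (by omega : (pvBuildF p m).1.length ≤ m+2),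
              ihlen]
          simp
        have hGle : pvG p ((p.drop 1).take (m+1)) ≤ p.length := by
          unfold pvG; exact Nat.findGreatest_le _
        have hGsuf : p.take (pvG p ((p.drop 1).take (m+1))) <:+ (p.drop 1).take (m+1) := by
          unfold pvG
          exact Nat.findGreatest_spec (P := fun x => p.take x <:+ (p.drop 1).take (m+1))
            (Nat.zero_le _) (by simp)
        have hGlen : pvG p ((p.drop 1).take (m+1)) ≤ m + 1 := by
          have := pv_take_suffix_le p _ _ hGle hGsuf
          rw [List.length_take, Nat.min_eq_left (by omega)] at this
          omega
        have hip : m + 1 < p.length := by omega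
        refine ⟨?_, ?_, ?_⟩
        · rw [hgnew]; omega
        · rw [hgnew]
          exact (pv_proper_border p (m+1) _ hip hGlen).mpr hGsuf
        · intro b hb1 hb2
          rw [hgnew] at hb1
          intro hcon
          have hbsuf : p.take b <:+ (p.drop 1).take (m+1) :=
            (pv_proper_border p (m+1) b hip (by omega)).mp hcon
          have : b ≤ pvG p ((p.drop 1).take (m+1)) := by
            unfold pvG
            exact Nat.le_findGreatest (by omega) hbsuf
          omega

-- the table Source B builds for a non-empty pattern is correct at every index it can be read at
theorem pv_tab_full (p : List Char) (hp : p ≠ []) :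
    ∀ i, 1 ≤ i → i < p.length → pvTabOK p (pvBuildF p (p.length - 1)).1 i := by
  intro i h1 h2
  exact (pv_build_inv p hp (p.length - 1) le_rfl).2.2 i h1 (by omega)

-- the table expression as it appears in the B port
def pvPortF (p : List Char) : List Nat :=
  ((PySem.List.pyRange 1 (p.length : Int) 1).foldl
    (fun (fk : List Nat × Nat) j =>
      let k := pvKmpStep p fk.1 fk.2 (p.getD j.toNat ' ')
      (fk.1 ++ [k], k)) ([0, 0], 0)).1

theorem pv_portF_eq (p : List Char) (hp : p ≠ []) :
    pvPortF p = (pvBuildF p (p.length - 1)).1 := by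
  have hL1 : 1 ≤ p.length := by
    cases p with
    | nil => exact absurd rfl hp
    | cons a l => simp
  unfold pvPortF pvBuildF
  have hc : ((p.length : Nat) : Int) = 1 + ((p.length - 1 : Nat) : Int) := by omega
  rw [hc]

-- A's inner max-loop computes findGreatest of its slice condition
theorem pv_foldA (t c : String) (m : Nat) :
    (PySem.List.pyRange 0 ((m : Int) + 1) 1).foldl (fun longest x =>
      if (if PySem.Str.slice t (some (-x)) none == PySem.Str.slice c (some 0) (some x)
          then true else false) = true then
        if x > longest then x else longest
      else longest) 0
    = ((Nat.findGreatest (fun x =>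
        (PySem.Str.slice t (some (-(x:Int))) none == PySem.Str.slice c (some 0) (some (x:Int))) = true) m : Nat) : Int) := by
  induction m with
  | zero =>
    have e1 : PySem.List.pyRange 0 (((0 : Nat) : Int) + 1) 1 = [0] := by decide
    rw [e1]
    simp only [List.foldl_cons, List.foldl_nil, Nat.findGreatest_zero]
    split_ifs <;> norm_num
  | succ m ih =>
    have hcast : (((m + 1 : Nat)) : Int) = (m : Int) + 1 := by push_cast; ring
    rw [hcast,
        PySem.List.pyRange_one_succ_right (by positivity : (0 : Int) ≤ (m : Int) + 1),
        List.foldl_append, ih, List.foldl_cons, List.foldl_nil, Nat.findGreatest_succ]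
    have hle : ((Nat.findGreatest (fun x =>
        (PySem.Str.slice t (some (-(x:Int))) none == PySem.Str.slice c (some 0) (some (x:Int))) = true) m : Nat) : Int)
        ≤ (m : Int) := by exact_mod_cast Nat.findGreatest_le m
    by_cases hq : (PySem.Str.slice t (some (-((m:Int)+1))) none
        == PySem.Str.slice c (some 0) (some ((m:Int)+1))) = true
    · rw [if_pos hq]
      have hq' : (PySem.Str.slice t (some (-((m+1:Nat) : Int))) none
          == PySem.Str.slice c (some 0) (some ((m+1:Nat) : Int))) = true := by
        rw [hcast]; exact hq
      rw [if_pos hq', if_pos (by omega : (m : Int) + 1 > _), hcast]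
      simp
    · rw [if_neg (by simpa using hq)]
      have hq' : ¬ (PySem.Str.slice t (some (-((m+1:Nat) : Int))) none
          == PySem.Str.slice c (some 0) (some ((m+1:Nat) : Int))) = true := by
        rw [hcast]; exact hq
      rw [if_neg hq']

-- A's slice condition, for 1 ≤ x ≤ L and |c| = |t| = L, is the reversed suffix condition
theorem pv_cond_iff (t c : String) (x : Nat)
    (hlen : c.toList.length = t.toList.length) (h1 : 1 ≤ x) (hx : x ≤ t.toList.length) :
    ((PySem.Str.slice t (some (-(x:Int))) none == PySem.Str.slice c (some 0) (some (x:Int))) = true)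
    ↔ t.toList.reverse.take x <:+ c.toList.reverse := by
  have hL1 : (PySem.Str.slice t (some (-(x:Int))) none).toList
      = t.toList.drop (t.toList.length - x) := by
    simp [PySem.Str.toList_slice, PySem.List.slice_from_neg_natCast _ x h1]
  have hL2 : (PySem.Str.slice c (some 0) (some (x:Int))).toList = c.toList.take x := by
    simp [PySem.Str.toList_slice, PySem.List.slice_to_natCast]
  rw [beq_iff_eq, ← String.toList_inj, hL1, hL2,
      pv_take_suffix_iff _ _ _ (by simpa using hx)]
  have e1 : t.toList.reverse.take x = (t.toList.drop (t.toList.length - x)).reverse := by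
    rw [List.reverse_drop]
    congr 1
    omega
  have e2 : c.toList.reverse.drop (c.toList.reverse.length - x)
      = (c.toList.take x).reverse := by
    rw [List.reverse_take]
    congr 1
    simp
  rw [e1, e2, List.reverse_inj]

-- findGreatest congruence on 1..n (findGreatest never evaluates its predicate at 0)
theorem pv_findGreatest_congr (P Q : Nat → Prop) [DecidablePred P] [DecidablePred Q] (n : Nat)
    (h : ∀ x, 1 ≤ x → x ≤ n → (P x ↔ Q x)) :
    Nat.findGreatest P n = Nat.findGreatest Q n := by
  induction n with
  | zero => rfl
  | succ n ih =>
    rw [Nat.findGreatest_succ, Nat.findGreatest_succ]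
    have hiff := h (n+1) (by omega) le_rfl
    by_cases hp : P (n+1)
    · rw [if_pos hp, if_pos (hiff.mp hp)]
    · rw [if_neg hp, if_neg (fun hq => hp (hiff.mpr hq)),
        ih (fun x h1 h2 => h x h1 (by omega))]

-- A's per-candidate score equals B's automaton state, as integers
theorem pv_inner_eq (t c : String) (hlen : c.toList.length = t.toList.length) (ht : t ≠ "") :
    findLargestOverlap t c
    = ((c.toList.reverse.foldl (pvKmpStep t.toList.reverse (pvPortF t.toList.reverse)) 0 : Nat) : Int) := by
  have hEq : strandsAreEqualLengths t c = true := by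
    simp only [strandsAreEqualLengths]
    apply decide_eq_true
    rw [PySem.Str.len_eq, PySem.Str.len_eq]
    exact_mod_cast hlen.symm
  have hLen : PySem.Str.len t = ((t.toList.length : Nat) : Int) := by
    rw [PySem.Str.len_eq]
  simp only [findLargestOverlap]
  rw [if_pos ⟨hEq, ht⟩, hLen, pv_foldA t c t.toList.length]
  congr 1
  rw [pv_findGreatest_congr _ _ _ (fun x hx1 hx2 => pv_cond_iff t c x hlen hx1 hx2)]
  have hrt : t.toList.reverse ≠ [] := by
    simp only [ne_eq, List.reverse_eq_nil_iff]
    intro h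
    exact ht (by rw [← String.toList_inj]; simpa using h)
  rw [pv_scan_spec t.toList.reverse (pvPortF t.toList.reverse) c.toList.reverse
      (by simpa using le_of_eq hlen)
      (by rw [pv_portF_eq _ hrt]; exact pv_tab_full _ hrt)]
  unfold pvG
  congr 1
  simp

-- the two outer folds agree (A's state is (longest, cand), B's is (cand, longest))
theorem pv_outer (t : String) (cs : List String) (st : Int × String) (hst : 0 ≤ st.1) :
    (let r := cs.foldl (fun (st : Int × String) x =>
        let test := findLargestOverlap t x
        if test > st.1 then (test, x) else st) st
     ((r.2, r.1) : String × Int))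
    = cs.foldl (fun (st : String × Int) c =>
        if c.toList.length = t.toList.length then
          let j : Nat := c.toList.reverse.foldl (pvKmpStep t.toList.reverse (pvPortF t.toList.reverse)) 0
          if (j : Int) > st.2 then (c, (j : Int)) else st
        else st) (st.2, st.1) := by
  induction cs generalizing st with
  | nil => simp
  | cons c rest ih =>
    simp only [List.foldl_cons]
    by_cases hl : c.toList.length = t.toList.length
    · by_cases ht : t = ""
      · have hA : findLargestOverlap t c = -1 := by
          simp [findLargestOverlap, ht]
        have hc0 : c.toList = [] := by
          apply List.length_eq_zero_iff.mp
          subst ht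
          simpa using hl
        rw [hA, if_neg (by omega : ¬(-1 : Int) > st.1), if_pos hl]
        simp only [hc0, List.reverse_nil, List.foldl_nil]
        rw [if_neg (by omega : ¬((0:Nat) : Int) > (st.2, st.1).2)]
        exact ih st hst
      · rw [pv_inner_eq t c hl ht, if_pos hl]
        set j : Nat := c.toList.reverse.foldl
          (pvKmpStep t.toList.reverse (pvPortF t.toList.reverse)) 0 with hj
        by_cases hgt : (j : Int) > st.1
        · rw [if_pos hgt, if_pos (by exact hgt : (j : Int) > (st.2, st.1).2)]
          exact ih ((j : Int), c) (by positivity)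
        · rw [if_neg hgt, if_neg (by exact hgt : ¬ (j : Int) > (st.2, st.1).2)]
          exact ih st hst
    · have hs : strandsAreEqualLengths t c = false := by
        simp only [strandsAreEqualLengths]
        apply decide_eq_false
        intro h
        rw [PySem.Str.len_eq, PySem.Str.len_eq] at h
        exact hl (by exact_mod_cast h.symm)
      have hA : findLargestOverlap t c = -1 := by
        simp [findLargestOverlap, hs]
      rw [hA, if_neg (by omega : ¬(-1 : Int) > st.1), if_neg hl]
      exact ih st hst

-- ===== VERDICT (by name: the statement is the Claim_ definition above) =====
theorem findBestCandidate_spec : Claim_equal_findBestCandidate := by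
  intro target candidates _
  unfold Spec_findBestCandidate findBestCandidate findBestCandidate_alt
  have h := pv_outer target candidates (0, "") (by norm_num)
  simpa [pvPortF] using h
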